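-- pv_equiv track=rewrite | github.com/Sea-Snell/advent_of_code_2023 | 28/28.py | tilt_down
-- ===== SOURCE A (Python) =====
-- def tilt_down(grid):
--     h, w = len(grid), len(grid[0])
--     curr_row = [h-1 for _ in range(w)]
--     new_grid = [list(row) for row in grid]
--     for row_idx in range(h-1, -1, -1):
--         for col_idx in range(w):
--             if grid[row_idx][col_idx] == 'O':
--                 new_grid[row_idx][col_idx] = '.'
--                 new_grid[curr_row[col_idx]][col_idx] = 'O'
--                 curr_row[col_idx] -= 1
--             elif grid[row_idx][col_idx] == '#':
--                 curr_row[col_idx] = row_idx - 1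
--     return [''.join(row) for row in new_grid]
-- ===== SOURCE B (Python) =====
-- def tilt_down(grid):
--     h, w = len(grid), len(grid[0])
--
--     def seg(s):
--         k = s.count('O')
--         return s.replace('O', '.')[:len(s) - k] + 'O' * k
--
--     def pack(s):
--         out = []
--         while True:
--             i = s.find('#')
--             if i == -1:
--                 return ''.join(out) + seg(s)
--             out.append(seg(s[:i]) + '#')
--             s = s[i + 1:]
--
--     new = [list(row) for row in grid]
--     for c in range(w):
--         col = pack(''.join(grid[r][c] for r in range(h)))
--         for r in range(h):
--             new[r][c] = col[r]
--     return [''.join(row) for row in new]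
-- ===== Notes on version B (the rewrite author's own statement) =====
-- stated objective: alternative
-- what changed: B packs each column independently (split the column at '#' walls, clear the 'O's and place count-many at the bottom of each run via a count/replace formula) and writes the packed column back into a character-matrix copy, replacing A's simultaneous bottom-up row sweep with per-column falling pointers; Pre_ excludes only the inputs where A raises IndexError (empty grid, or a row shorter than the first row).
import Mathlib
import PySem

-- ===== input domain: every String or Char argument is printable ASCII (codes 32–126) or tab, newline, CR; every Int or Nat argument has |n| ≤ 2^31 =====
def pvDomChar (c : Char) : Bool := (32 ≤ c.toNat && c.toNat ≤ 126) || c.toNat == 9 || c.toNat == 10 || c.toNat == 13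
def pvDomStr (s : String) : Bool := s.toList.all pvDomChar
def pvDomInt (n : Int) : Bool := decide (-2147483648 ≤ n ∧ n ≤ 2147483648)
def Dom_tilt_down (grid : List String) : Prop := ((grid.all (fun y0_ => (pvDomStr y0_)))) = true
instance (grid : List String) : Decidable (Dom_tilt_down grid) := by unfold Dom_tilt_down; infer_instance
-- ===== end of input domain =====

-- B packs each column independently (split at '#' walls, count-and-place the 'O's) and writes
-- the packed column back into a character-matrix copy, instead of A's mutable bottom-up pointer scan.

-- ===== PORT A =====
-- new_grid[r][c] = ch  (list-of-rows update; exact for the in-range indices A uses)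
def pvSet2 (g : List (List Char)) (r c : Nat) (ch : Char) : List (List Char) :=
  g.set r ((g.getD r []).set c ch)

-- body of A's inner loop over col_idx at row i; state = (new_grid, curr_row)
def pvInner (grid : List String) (i : Nat) (st : List (List Char) × List Int) (c : Nat) :
    List (List Char) × List Int :=
  let ch := (grid.getD i "").toList.getD c ' '
  if ch = 'O' then
    (pvSet2 (pvSet2 st.1 i c '.') (st.2.getD c 0).toNat c 'O',
     st.2.set c (st.2.getD c 0 - 1))
  else if ch = '#' then (st.1, st.2.set c ((i : Int) - 1))
  else st

def tilt_down (grid : List String) : List String :=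
  let h := grid.length
  let w := (grid.headD "").length
  (((List.range h).reverse).foldl (fun st i => (List.range w).foldl (pvInner grid i) st)
      (grid.map String.toList, List.replicate w ((h : Int) - 1))).1.map String.mk

-- ===== PORT B =====
-- seg: s.replace('O','.')[:len(s)-k] + 'O'*k
def pvSeg (s : List Char) : List Char :=
  let k := s.count 'O'
  (s.map (fun ch => if ch = 'O' then '.' else ch)).take (s.length - k) ++ List.replicate k 'O'

-- pack: the while loop splitting a column at '#' (s.find('#') = length of the '#'-free prefix
-- when '#' occurs, and the loop returns when it does not)
def pvPack (acc : List Char) (s : List Char) : List Char :=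
  let p := s.takeWhile (fun ch => ch ≠ '#')
  if hlt : p.length < s.length then pvPack (acc ++ pvSeg p ++ ['#']) (s.drop (p.length + 1))
  else acc ++ pvSeg s
termination_by s.length
decreasing_by simp only [List.length_drop]; omega

def tilt_down_alt (grid : List String) : List String :=
  let h := grid.length
  let w := (grid.headD "").length
  let new := grid.map String.toList
  ((List.range w).foldl (fun g c =>
      let col := pvPack [] ((List.range h).map (fun r => (grid.getD r "").toList.getD c ' '))
      (List.range h).foldl (fun g r => pvSet2 g r c (col.getD r ' ')) g) new).map String.mk

-- ===== PRECONDITION & SPEC =====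
-- Pre_ excludes exactly the inputs on which A raises IndexError: the empty grid (grid[0]) and
-- grids with a row shorter than the first row (grid[row_idx][col_idx]).
def Pre_tilt_down (grid : List String) : Prop :=
  grid ≠ [] ∧ ∀ s ∈ grid, (grid.headD "").length ≤ s.length
instance (grid : List String) : Decidable (Pre_tilt_down grid) := by
  unfold Pre_tilt_down; infer_instance

def pvWitness_tilt_down : List String := ["O.x", "#..", "OO."]

def Spec_tilt_down (grid : List String) (out : List String) : Prop := out = tilt_down_alt grid
instance (grid : List String) (out : List String) : Decidable (Spec_tilt_down grid out) := by
  unfold Spec_tilt_down; infer_instance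

-- ===== CLAIM (what is proved, stated in full; the proofs are below) =====
def Claim_equal_tilt_down : Prop :=
  ∀ (grid : List String), Dom_tilt_down grid → Pre_tilt_down grid →
    Spec_tilt_down grid (tilt_down grid)

-- ===== LEMMAS AND PROOFS =====

-- column c of the original grid, read exactly as both ports read it
def colOf (grid : List String) (c : Nat) : List Char :=
  (List.range grid.length).map (fun r => (grid.getD r "").toList.getD c ' ')

-- A's per-column step: what pvInner does to the column-c slice of its state
def colStep (orig : List Char) (st : List Char × Int) (i : Nat) : List Char × Int :=
  let ch := orig.getD i ' '
  if ch = 'O' then ((st.1.set i '.').set st.2.toNat 'O', st.2 - 1)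
  else if ch = '#' then (st.1, (i : Int) - 1)
  else st

-- recursive form of pvPack (no accumulator)
def colRec (u : List Char) : List Char :=
  let p := u.takeWhile (fun ch => ch ≠ '#')
  if _hlt : p.length < u.length then pvSeg p ++ '#' :: colRec (u.drop (p.length + 1))
  else pvSeg u
termination_by u.length
decreasing_by simp only [List.length_drop]; omega

def colRecRest (u : List Char) : List Char :=
  let p := u.takeWhile (fun ch => ch ≠ '#')
  if (p.length < u.length) then '#' :: colRec (u.drop (p.length + 1))
  else []

-- the product-form states the 2D folds preserve
def formG (grid : List String) (w : Nat) (f : Nat → List Char) : List (List Char) :=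
  (List.range grid.length).map (fun r =>
    (List.range w).map (fun c => (f c).getD r ' ') ++ ((grid.getD r "").toList.drop w))

def formC (w : Nat) (f : Nat → Int) : List Int := (List.range w).map f

lemma takeWhile_eq_self_of_len {u : List Char} {P : Char → Bool}
    (h : ¬ (u.takeWhile P).length < u.length) : u.takeWhile P = u :=
  (List.takeWhile_prefix P).eq_of_length
    (by have := (List.takeWhile_prefix (l := u) P).length_le; omega)

lemma colRec_eq (u : List Char) :
    colRec u = pvSeg (u.takeWhile (fun ch => ch ≠ '#')) ++ colRecRest u := by
  rw [colRec, colRecRest]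
  split_ifs with hlt
  · rfl
  · rw [takeWhile_eq_self_of_len hlt, List.append_nil]

lemma colRecRest_cons (ch : Char) (hch : ¬ ch = '#') (u : List Char) :
    colRecRest (ch :: u) = colRecRest u := by
  simp [colRecRest, hch]

lemma pack_eq (s acc : List Char) : pvPack acc s = acc ++ colRec s := by
  fun_induction pvPack acc s with
  | case1 acc s p hlt ih =>
    rw [colRec, dif_pos hlt, ih]
    simp only [List.append_assoc, List.singleton_append]
    rfl
  | case2 acc s p hlt =>
    rw [colRec, dif_neg hlt]

lemma pvSeg_length (s : List Char) : (pvSeg s).length = s.length := by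
  have : s.count 'O' ≤ s.length := List.count_le_length
  simp [pvSeg]
  omega

lemma colRec_length (u : List Char) : (colRec u).length = u.length := by
  fun_induction colRec u with
  | case1 u p hlt ih =>
    simp only [List.length_append, pvSeg_length, List.length_cons, ih, List.length_drop]
    omega
  | case2 u p hlt => exact pvSeg_length u

lemma read_colOf (grid : List String) (c i : Nat) :
    (colOf grid c).getD i ' ' = (grid.getD i "").toList.getD c ' ' := by
  unfold colOf
  by_cases hi : i < grid.length
  · simp [List.getD_eq_getElem?_getD, hi]
  · have h1 : grid.getD i "" = "" := List.getD_eq_default _ _ (by omega)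
    rw [h1, List.getD_eq_default _ _ (by simpa using Nat.le_of_not_lt hi)]
    rfl

lemma colStep_len (orig : List Char) (st : List Char × Int) (i : Nat) :
    ((colStep orig st i).1).length = st.1.length := by
  simp only [colStep]; split_ifs <;> simp

lemma formG_congr (grid : List String) (w : Nat) (f f' : Nat → List Char)
    (h : ∀ c < w, f c = f' c) : formG grid w f = formG grid w f' := by
  unfold formG
  refine List.map_congr_left fun r _ => ?_
  congr 1
  exact List.map_congr_left fun c hc => by rw [h c (List.mem_range.mp hc)]

lemma formC_congr (w : Nat) (f f' : Nat → Int) (h : ∀ c < w, f c = f' c) :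
    formC w f = formC w f' := by
  exact List.map_congr_left fun c hc => h c (List.mem_range.mp hc)

lemma mapRange_set {α : Type} (w : Nat) (f : Nat → α) {c : Nat} (_hc : c < w) (v : α) :
    ((List.range w).map f).set c v = (List.range w).map (fun c' => if c' = c then v else f c') := by
  apply List.ext_getElem (by simp)
  intro i h1 h2
  simp only [List.length_set, List.length_map, List.length_range] at h1
  rw [List.getElem_set]
  simp only [List.getElem_map, List.getElem_range]
  by_cases h : i = c
  · simp [h]
  · simp [h, Ne.symm h]

lemma getD_set_self {α : Type} {l : List α} {r : Nat} (h : r < l.length) (ch d : α) :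
    (l.set r ch).getD r d = ch := by
  simp [List.getD_eq_getElem?_getD, h]

lemma getD_set_ne {α : Type} {l : List α} {r r' : Nat} (h : ¬ r = r') (ch d : α) :
    (l.set r ch).getD r' d = l.getD r' d := by
  simp [List.getD_eq_getElem?_getD, h]

lemma set_eq_of_le {α : Type} {l : List α} {r : Nat} (h : l.length ≤ r) (ch : α) :
    l.set r ch = l := List.set_eq_of_length_le h

lemma formC_getD (w : Nat) (f : Nat → Int) {c : Nat} (hc : c < w) :
    (formC w f).getD c 0 = f c := by
  simp [formC, List.getD_eq_getElem?_getD, hc]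

lemma formC_set (w : Nat) (f : Nat → Int) {c : Nat} (hc : c < w) (v : Int) :
    (formC w f).set c v = formC w (fun c' => if c' = c then v else f c') :=
  mapRange_set w f hc v

lemma set2_formG (grid : List String) (w : Nat) (f : Nat → List Char)
    (hlen : ∀ c, (f c).length = grid.length) (r : Nat) {n : Nat} (hn : n < w) (ch : Char) :
    pvSet2 (formG grid w f) r n ch
      = formG grid w (fun c => if c = n then (f n).set r ch else f c) := by
  by_cases hr : r < grid.length
  · unfold pvSet2 formG
    have hgetD : ((List.range grid.length).map (fun r' =>
        (List.range w).map (fun c => (f c).getD r' ' ') ++ ((grid.getD r' "").toList.drop w))).getD r []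
        = (List.range w).map (fun c => (f c).getD r ' ') ++ ((grid.getD r "").toList.drop w) := by
      simp [List.getD_eq_getElem?_getD, hr]
    rw [hgetD, List.set_append, if_pos (by simpa using hn),
        mapRange_set w _ hn, mapRange_set grid.length _ hr]
    refine List.map_congr_left fun r' hr' => ?_
    dsimp only
    by_cases h : r' = r
    · subst h
      rw [if_pos rfl]
      congr 1
      refine List.map_congr_left fun c _ => ?_
      dsimp only
      by_cases hcn : c = n
      · subst hcn
        have hx : ((f c).set r' ch).getD r' ' ' = ch := getD_set_self (by rw [hlen]; exact hr) _ _
        simpa using hx.symm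
      · simp [hcn]
    · rw [if_neg h]
      congr 1
      refine List.map_congr_left fun c _ => ?_
      dsimp only
      by_cases hcn : c = n
      · subst hcn
        have hx : ((f c).set r ch).getD r' ' ' = (f c).getD r' ' ' :=
          getD_set_ne (fun hh => h hh.symm) _ _
        simpa using hx.symm
      · simp [hcn]
  · have h1 : pvSet2 (formG grid w f) r n ch = formG grid w f := by
      unfold pvSet2
      exact set_eq_of_le (by simp [formG]; omega) _
    rw [h1]
    refine formG_congr grid w _ _ fun c _ => ?_
    by_cases hcn : c = n
    · subst hcn; rw [if_pos rfl, set_eq_of_le (by rw [hlen]; omega)]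
    · simp [hcn]

lemma inner_step (grid : List String) (w : Nat) (i : Nat) (f : Nat → List Char) (fc : Nat → Int)
    (hlen : ∀ c, (f c).length = grid.length) {n : Nat} (hn : n < w) :
    pvInner grid i (formG grid w f, formC w fc) n
      = (formG grid w (fun c => if c = n then (colStep (colOf grid n) (f n, fc n) i).1 else f c),
         formC w (fun c => if c = n then (colStep (colOf grid n) (f n, fc n) i).2 else fc c)) := by
  have hread : (grid.getD i "").toList.getD n ' ' = (colOf grid n).getD i ' ' :=
    (read_colOf grid n i).symm
  simp only [pvInner, colStep, hread]
  split_ifs with h1 h2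
  · rw [formC_getD w fc hn, formC_set w fc hn,
        set2_formG grid w f hlen i hn '.',
        set2_formG grid w _ (fun c => by by_cases hc : c = n <;> simp [hc, hlen]) _ hn 'O']
    refine Prod.ext ?_ ?_
    · refine formG_congr grid w _ _ fun c _ => ?_
      by_cases hc : c = n <;> simp [hc]
    · rfl
  · rw [formC_set w fc hn]
    refine Prod.ext ?_ ?_
    · exact (formG_congr grid w _ _ fun c _ => by by_cases hc : c = n <;> simp [hc]).symm
    · rfl
  · refine Prod.ext ?_ ?_
    · exact (formG_congr grid w _ _ fun c _ => by by_cases hc : c = n <;> simp [hc]).symm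
    · exact (formC_congr w _ _ fun c _ => by by_cases hc : c = n <;> simp [hc]).symm

lemma inner_fold (grid : List String) (w : Nat) (i : Nat) (f : Nat → List Char) (fc : Nat → Int)
    (hlen : ∀ c, (f c).length = grid.length) :
    (List.range w).foldl (pvInner grid i) (formG grid w f, formC w fc)
      = (formG grid w (fun c => (colStep (colOf grid c) (f c, fc c) i).1),
         formC w (fun c => (colStep (colOf grid c) (f c, fc c) i).2)) := by
  suffices h : ∀ m ≤ w, (List.range m).foldl (pvInner grid i) (formG grid w f, formC w fc)
      = (formG grid w (fun c => if c < m then (colStep (colOf grid c) (f c, fc c) i).1 else f c),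
         formC w (fun c => if c < m then (colStep (colOf grid c) (f c, fc c) i).2 else fc c)) by
    rw [h w le_rfl]
    exact Prod.ext
      (formG_congr grid w _ _ fun c hc => by simp [hc])
      (formC_congr w _ _ fun c hc => by simp [hc])
  intro m hm
  induction m with
  | zero =>
    simp only [List.range_zero, List.foldl_nil]
    exact Prod.ext
      (formG_congr grid w _ _ fun c _ => by simp)
      (formC_congr w _ _ fun c _ => by simp)
  | succ m ih =>
    rw [List.range_succ, List.foldl_append, ih (by omega), List.foldl_cons, List.foldl_nil,
        inner_step grid w i _ _ (fun c => by by_cases hc : c < m <;> simp [hc, colStep_len, hlen]) (show m < w by omega)]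
    refine Prod.ext ?_ ?_
    · refine formG_congr grid w _ _ fun c hc => ?_
      rcases Nat.lt_trichotomy c m with h | h | h
      · simp [h, Nat.lt_succ_of_lt h, Nat.ne_of_lt h]
      · subst h; simp
      · simp [Nat.not_le_of_lt h, Nat.not_lt_of_lt h, Nat.ne_of_gt h]
    · refine formC_congr w _ _ fun c hc => ?_
      rcases Nat.lt_trichotomy c m with h | h | h
      · simp [h, Nat.lt_succ_of_lt h, Nat.ne_of_lt h]
      · subst h; simp
      · simp [Nat.not_le_of_lt h, Nat.not_lt_of_lt h, Nat.ne_of_gt h]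

lemma outer_fold (grid : List String) (w : Nat) (L : List Nat) (f : Nat → List Char)
    (fc : Nat → Int) (hlen : ∀ c, (f c).length = grid.length) :
    L.foldl (fun st i => (List.range w).foldl (pvInner grid i) st) (formG grid w f, formC w fc)
      = (formG grid w (fun c => (L.foldl (colStep (colOf grid c)) (f c, fc c)).1),
         formC w (fun c => (L.foldl (colStep (colOf grid c)) (f c, fc c)).2)) := by
  induction L generalizing f fc with
  | nil => simp
  | cons i L ih =>
    rw [List.foldl_cons, inner_fold grid w i f fc hlen,
        ih _ _ (fun c => by rw [colStep_len]; exact hlen c)]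
    simp

lemma row_split (l : List Char) (w : Nat) (hw : w ≤ l.length) :
    (List.range w).map (fun c => l.getD c ' ') ++ l.drop w = l := by
  conv_rhs => rw [← List.take_append_drop w l]
  congr 1
  apply List.ext_getElem (by simp [hw])
  intro i h1 h2
  simp only [List.length_map, List.length_range] at h1
  simp [List.getD_eq_getElem?_getD, List.getElem?_eq_getElem (show i < l.length by omega)]

lemma init_formG (grid : List String) (hpre : Pre_tilt_down grid) :
    grid.map String.toList = formG grid (grid.headD "").length (colOf grid) := by
  unfold formG
  apply List.ext_getElem (by simp)
  intro r h1 h2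
  simp only [List.length_map] at h1
  rw [List.getElem_map]
  simp only [List.getElem_map, List.getElem_range]
  have hrow : grid.getD r "" = grid[r] := List.getD_eq_getElem grid "" h1
  rw [hrow,
      show ((List.range (grid.headD "").length).map fun c => (colOf grid c).getD r ' ')
        = ((List.range (grid.headD "").length).map fun c => grid[r].toList.getD c ' ') from
      List.map_congr_left fun c _ => by rw [read_colOf, hrow]]
  exact (row_split grid[r].toList (grid.headD "").length
    (by simpa using hpre.2 grid[r] (List.getElem_mem h1))).symm

lemma init_formC (grid : List String) :
    List.replicate (grid.headD "").length ((grid.length : Int) - 1)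
      = formC (grid.headD "").length (fun _ => (grid.length : Int) - 1) := by
  simp [formC]

lemma set_append_right {α : Type} (l1 l2 : List α) (j : Nat) (a : α) :
    (l1 ++ l2).set (l1.length + j) a = l1 ++ l2.set j a := by
  rw [List.set_append]; simp

lemma seg_cons (ch : Char) (hch : ¬ ch = 'O') (p : List Char) :
    pvSeg (ch :: p) = ch :: pvSeg p := by
  unfold pvSeg
  have hk : (ch :: p).count 'O' = p.count 'O' := by
    rw [List.count_cons]; simp [hch]
  have hkp : p.count 'O' ≤ p.length := List.count_le_length
  rw [hk]
  simp only [List.map_cons, List.length_cons, if_neg hch]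
  rw [show p.length + 1 - p.count 'O' = (p.length - p.count 'O') + 1 by omega,
      List.take_succ_cons, List.cons_append]

lemma seg_set (p R : List Char) :
    ('.' :: (pvSeg p ++ R)).set (p.length - p.count 'O') 'O'
      = pvSeg ('O' :: p) ++ R := by
  have hkp : p.count 'O' ≤ p.length := List.count_le_length
  set k := p.count 'O' with hk
  set n := p.length - k with hn
  set T := (p.map (fun ch => if ch = 'O' then '.' else ch)).take n with hT
  have hTlen : T.length = n := by
    rw [hT, List.length_take, List.length_map]; omega
  have hseg : pvSeg p = T ++ List.replicate k 'O' := by rw [pvSeg]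
  have hstep1 : ('.' :: (pvSeg p ++ R)) = ('.' :: T) ++ (List.replicate k 'O' ++ R) := by
    rw [hseg]; simp
  rw [hstep1, List.set_append, if_pos (by simp [hTlen])]
  have hdrop : ('.' :: T).drop (n + 1) = [] :=
    List.drop_eq_nil_of_le (by simp [hTlen])
  have htake : ('.' :: T).take n
      = ('.' :: p.map (fun ch => if ch = 'O' then '.' else ch)).take n := by
    rw [hT, ← List.take_succ_cons, List.take_take, Nat.min_eq_left (Nat.le_succ n)]
  have hset : ('.' :: T).set n 'O'
      = ('.' :: p.map (fun ch => if ch = 'O' then '.' else ch)).take n ++ ['O'] := by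
    rw [List.set_eq_take_append_cons_drop, if_pos (by simp [hTlen]), hdrop, htake]
  rw [hset]
  have hsegO : pvSeg ('O' :: p) = ('.' :: p.map (fun ch => if ch = 'O' then '.' else ch)).take n
      ++ 'O' :: List.replicate k 'O' := by
    have hcnt : ('O' :: p).count 'O' = k + 1 := by rw [List.count_cons]; simp [hk]
    rw [pvSeg, hcnt]
    simp only [List.map_cons, List.length_cons]
    rw [show p.length + 1 - (k + 1) = n by omega, List.replicate_succ]
    simp
  rw [hsegO]
  simp

-- the single-column invariant: after processing rows len-1 .. i (bottom-up), the column reads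
-- s.take i ++ colRec (s.drop i) and the pointer sits below the packed part of the first run
lemma colInv (s : List Char) (n i : Nat) (hn : s.length - i = n) (hi : i ≤ s.length) :
    ((List.range' i n).reverse).foldl (colStep s) (s, (s.length : Int) - 1)
      = (s.take i ++ colRec (s.drop i),
         (i : Int) + ((s.drop i).takeWhile (fun ch => ch ≠ '#')).length - 1
           - ((s.drop i).takeWhile (fun ch => ch ≠ '#')).count 'O') := by
  induction n generalizing i with
  | zero =>
    have hieq : i = s.length := by omega
    subst hieq
    have hcolnil : colRec [] = [] := by rw [colRec]; simp [pvSeg]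
    simp [hcolnil]
  | succ n ih =>
    have hi' : i < s.length := by omega
    rw [show List.range' i (n + 1) = i :: List.range' (i + 1) n from rfl,
        List.reverse_cons, List.foldl_append, ih (i + 1) (by omega) (by omega),
        List.foldl_cons, List.foldl_nil]
    have hdrop : s.drop i = s[i] :: s.drop (i + 1) := (List.getElem_cons_drop hi').symm
    have htake : s.take (i + 1) = s.take i ++ [s[i]] := by
      rw [List.take_add_one, List.getElem?_eq_getElem hi']; rfl
    have htakelen : (s.take i).length = i := by
      rw [List.length_take]; omega
    have hgetD : s.getD i ' ' = s[i] := List.getD_eq_getElem s ' ' hi'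
    set u := s.drop (i + 1) with hu
    set p := u.takeWhile (fun ch => ch ≠ '#') with hp
    set k := p.count 'O' with hk
    have hkp : k ≤ p.length := List.count_le_length
    by_cases hO : s[i] = 'O'
    · -- rock: cleared at i, dropped at the pointer
      have hcurr : ((i + 1 : Nat) : Int) + p.length - 1 - k = ((i + (p.length - k) : Nat) : Int) := by
        push_cast [Nat.cast_sub hkp]; ring
      simp only [colStep, hgetD, hO, reduceIte]
      rw [hcurr, Int.toNat_natCast, hdrop, hO]
      have htw : ('O' :: u).takeWhile (fun ch => ch ≠ '#') = 'O' :: p := by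
        rw [List.takeWhile_cons, if_pos (by simp)]
      have hcr : colRec ('O' :: u) = pvSeg ('O' :: p) ++ colRecRest u := by
        rw [colRec_eq, htw, colRecRest_cons 'O' (by simp) u]
      have hg1 : (s.take (i + 1) ++ colRec u).set i '.'
          = s.take i ++ '.' :: colRec u := by
        rw [htake, hO, List.append_assoc, List.singleton_append]
        have h2 := set_append_right (s.take i) ('O' :: colRec u) 0 '.'
        rw [htakelen, Nat.add_zero] at h2
        rw [h2]
        rfl
      have hg2 : (s.take i ++ '.' :: colRec u).set (i + (p.length - k)) 'O'
          = s.take i ++ colRec ('O' :: u) := by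
        have h2 := set_append_right (s.take i) ('.' :: colRec u) (p.length - k) 'O'
        rw [htakelen] at h2
        rw [h2, colRec_eq u, ← hp, hk, seg_set p (colRecRest u), hcr]
      rw [hg1, hg2]
      refine Prod.ext rfl ?_
      rw [htw]
      simp
      push_cast [Nat.cast_sub hkp]
      omega
    · by_cases hH : s[i] = '#'
      · -- wall: pointer resets to i-1
        simp only [colStep, hgetD, hH, reduceIte]
        rw [hdrop, hH]
        have htw : ('#' :: u).takeWhile (fun ch => ch ≠ '#') = [] := by
          rw [List.takeWhile_cons, if_neg (by simp)]
        have hcr : colRec ('#' :: u) = '#' :: colRec u := by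
          rw [colRec]
          simp only [htw, List.length_nil, List.length_cons]
          rw [dif_pos (by omega)]
          simp [pvSeg]
        rw [hcr, htake, hH, htw]
        refine Prod.ext ?_ ?_
        · simp
        · simp
      · -- inert character
        simp only [colStep, hgetD, if_neg hO, if_neg hH]
        rw [hdrop]
        have htw : (s[i] :: u).takeWhile (fun ch => ch ≠ '#') = s[i] :: p := by
          rw [List.takeWhile_cons, if_pos (by simp [hH])]
        have hcr : colRec (s[i] :: u) = pvSeg (s[i] :: p) ++ colRecRest u := by
          rw [colRec_eq, htw, colRecRest_cons s[i] hH u]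
        rw [hcr, seg_cons s[i] hO p, htw, colRec_eq u, ← hp]
        refine Prod.ext ?_ ?_
        · rw [htake, List.append_assoc, List.singleton_append, List.cons_append]
        · simp [hO]
          ring

lemma colMain (s : List Char) :
    (((List.range s.length).reverse).foldl (colStep s) (s, (s.length : Int) - 1)).1
      = colRec s := by
  rw [List.range_eq_range', colInv s s.length 0 (by omega) (by omega)]
  simp

-- B's inner write-back loop: writing v into column c of a formG state cell by cell
lemma col_write (grid : List String) (w : Nat) (f : Nat → List Char)
    (hlen : ∀ c, (f c).length = grid.length) {c : Nat} (hc : c < w)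
    (v : List Char) (hv : v.length = grid.length) :
    (List.range grid.length).foldl (fun g r => pvSet2 g r c (v.getD r ' ')) (formG grid w f)
      = formG grid w (fun c' => if c' = c then v else f c') := by
  suffices h : ∀ m ≤ grid.length,
      (List.range m).foldl (fun g r => pvSet2 g r c (v.getD r ' ')) (formG grid w f)
        = formG grid w (fun c' => if c' = c then v.take m ++ (f c).drop m else f c') by
    rw [h grid.length le_rfl]
    refine formG_congr grid w _ _ fun c' _ => ?_
    by_cases hcc : c' = c
    · rw [if_pos hcc, if_pos hcc, List.take_of_length_le hv.le,
          List.drop_eq_nil_of_le (hlen c).le, List.append_nil]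
    · rw [if_neg hcc, if_neg hcc]
  intro m hm
  induction m with
  | zero =>
    simp only [List.range_zero, List.foldl_nil]
    refine formG_congr grid w _ _ fun c' _ => ?_
    by_cases hcc : c' = c
    · rw [if_pos hcc, hcc, List.take_zero, List.drop_zero, List.nil_append]
    · rw [if_neg hcc]
  | succ m ih =>
    rw [List.range_succ, List.foldl_append, ih (by omega), List.foldl_cons, List.foldl_nil,
        set2_formG grid w _ (fun c' => by
          by_cases hcc : c' = c
          · rw [if_pos hcc, List.length_append, List.length_take, List.length_drop, hlen, hv]
            omega
          · rw [if_neg hcc, hlen]) m hc (v.getD m ' ')]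
    refine formG_congr grid w _ _ fun c' _ => ?_
    by_cases hcc : c' = c
    · rw [if_pos hcc, hcc, if_pos rfl]
      have hm' : m < grid.length := by omega
      have hvg : v.getD m ' ' = v[m]'(by omega) := List.getD_eq_getElem v ' ' (by omega)
      have hts : (v.take m).length = m := by rw [List.length_take]; omega
      have hdropc : (f c).drop m = (f c)[m]'(by rw [hlen]; omega) :: (f c).drop (m + 1) :=
        (List.getElem_cons_drop _).symm
      have h2 := set_append_right (v.take m) ((f c).drop m) 0 (v.getD m ' ')
      rw [hts, Nat.add_zero] at h2
      rw [h2, hdropc, List.set_cons_zero, hvg,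
          show v.take (m + 1) = v.take m ++ [v[m]'(by omega)] by
            rw [List.take_add_one, List.getElem?_eq_getElem (by omega)]; rfl,
          List.append_assoc, List.singleton_append, if_pos rfl]
    · simp [hcc]

-- B's outer loop over columns: packs every column of a formG state
lemma alt_fold (grid : List String) (w : Nat) :
    (List.range w).foldl (fun g c =>
        (List.range grid.length).foldl
          (fun g r => pvSet2 g r c ((pvPack [] (colOf grid c)).getD r ' ')) g)
        (formG grid w (colOf grid))
      = formG grid w (fun c => colRec (colOf grid c)) := by
  have hcolLen : ∀ c, (colOf grid c).length = grid.length := fun c => by simp [colOf]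
  suffices h : ∀ m ≤ w, (List.range m).foldl (fun g c =>
      (List.range grid.length).foldl
        (fun g r => pvSet2 g r c ((pvPack [] (colOf grid c)).getD r ' ')) g)
      (formG grid w (colOf grid))
      = formG grid w (fun c => if c < m then colRec (colOf grid c) else colOf grid c) by
    rw [h w le_rfl]
    exact formG_congr grid w _ _ fun c hc => by simp [hc]
  intro m hm
  induction m with
  | zero =>
    simp only [List.range_zero, List.foldl_nil]
    exact formG_congr grid w _ _ fun c _ => by simp
  | succ m ih =>
    rw [List.range_succ, List.foldl_append, ih (by omega), List.foldl_cons, List.foldl_nil]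
    have hv : (pvPack [] (colOf grid m)).length = grid.length := by
      rw [pack_eq, List.nil_append, colRec_length, hcolLen]
    have hpk : pvPack [] (colOf grid m) = colRec (colOf grid m) := by
      rw [pack_eq, List.nil_append]
    rw [col_write grid w _ (fun c => by by_cases hc : c < m <;> simp [hc, colRec_length, hcolLen])
        (show m < w by omega) _ hv]
    refine formG_congr grid w _ _ fun c _ => ?_
    rcases Nat.lt_trichotomy c m with h | h | h
    · simp [h, Nat.lt_succ_of_lt h, Nat.ne_of_lt h]
    · subst h; simp [hpk]
    · have h1 : ¬ c < m + 1 := by omega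
      have h2 : ¬ c < m := by omega
      simp [h1, h2, Nat.ne_of_gt h]

-- ===== VERDICT (by name: the statement is the Claim_ definition above) =====
theorem tilt_down_spec : Claim_equal_tilt_down := by
  intro grid _ hpre
  show tilt_down grid = tilt_down_alt grid
  simp only [tilt_down, tilt_down_alt]
  rw [init_formG grid hpre, init_formC grid,
      outer_fold grid (grid.headD "").length ((List.range grid.length).reverse) (colOf grid)
        (fun _ => (grid.length : Int) - 1) (fun c => by simp [colOf])]
  have hcol : ∀ c, (((List.range grid.length).reverse).foldl (colStep (colOf grid c))
      (colOf grid c, (grid.length : Int) - 1)).1 = colRec (colOf grid c) := by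
    intro c
    have hlen : (colOf grid c).length = grid.length := by simp [colOf]
    have hm := colMain (colOf grid c)
    rw [hlen] at hm
    exact hm
  rw [formG_congr grid (grid.headD "").length _ _ (fun c _ => hcol c)]
  congr 1
  exact (alt_fold grid (grid.headD "").length).symm
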